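-- pv_equiv track=rewrite | github.com/Kapitoshka-a/Algorithm_labs | src/find_peak.py | find_left_peak_part
-- ===== SOURCE A (Python) =====
-- def find_left_peak_part(array, peaks):
--     left_part = []
--     start = sum([len(i) for i in peaks]) - 1 if peaks else 0
--     for i in range(start, len(array) - 1):
--
--         if array[i] < array[i + 1]:
--             left_part.append(array[i])
--         else:
--             if left_part:
--                 left_part.append(array[i])
--                 break
--     return left_part if len(left_part) >= 1 else None
-- ===== SOURCE B (Python) =====
-- def find_left_peak_part(array, peaks):
--     # Flags-and-boundaries approach: precompute the adjacent-ascent flag list once,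
--     # locate the segment boundaries with list.index, extract by index arithmetic.
--     start = sum(len(p) for p in peaks) - 1 if peaks else 0
--     flags = [array[i] < array[i + 1] for i in range(start, len(array) - 1)]
--     try:
--         k = flags.index(True)
--     except ValueError:
--         return None
--     try:
--         cnt = flags.index(False, k) - k + 1   # ascending run plus the peak element
--     except ValueError:
--         cnt = len(flags) - k                  # ascends to the end: no peak appended
--     return [array[start + k + t] for t in range(cnt)]
-- ===== Notes on version B (the rewrite author's own statement) =====
-- stated objective: alternative
-- what changed: A is one stateful scan whose phase is encoded in accumulator emptiness (skip descents, then collect-and-break); B has no scanning accumulator at all: it precomputes the list of adjacent-ascent flags, locates the segment boundaries with two list.index searches (first True, then first False after it), and extracts the answer purely by index arithmetic over that window.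
import Mathlib
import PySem

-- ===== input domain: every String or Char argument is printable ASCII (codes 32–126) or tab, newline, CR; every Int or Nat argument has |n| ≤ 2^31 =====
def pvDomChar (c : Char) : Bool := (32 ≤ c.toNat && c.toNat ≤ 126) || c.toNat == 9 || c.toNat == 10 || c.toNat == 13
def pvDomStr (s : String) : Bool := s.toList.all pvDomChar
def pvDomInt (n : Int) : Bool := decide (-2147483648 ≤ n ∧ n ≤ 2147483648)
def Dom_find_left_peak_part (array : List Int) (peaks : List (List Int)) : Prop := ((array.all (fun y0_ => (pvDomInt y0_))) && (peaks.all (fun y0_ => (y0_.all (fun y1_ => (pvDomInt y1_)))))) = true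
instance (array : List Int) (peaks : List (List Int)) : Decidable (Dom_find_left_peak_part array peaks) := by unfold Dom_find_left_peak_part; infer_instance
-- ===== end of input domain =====

-- B replaces A's stateful scan (accumulator-emptiness encodes the phase) by a staged
-- computation: precompute the adjacent-ascent flag list, locate the segment boundaries
-- with two index searches, and extract the answer by index arithmetic. Same cost.

-- ===== PORT A =====
-- A's for-loop with break, as structural recursion over the index list produced by range.
-- (the 'none' index branches are unreachable: every generated index is a valid Python index)
def pvLoopA (array : List Int) : List Int → List Int → List Int
  | [], acc => acc
  | i :: rest, acc =>
    match PySem.List.pyGet? array i, PySem.List.pyGet? array (i + 1) with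
    | some a, some b =>
      if a < b then pvLoopA array rest (acc ++ [a])
      else if acc ≠ [] then acc ++ [a]          -- append the peak and break
      else pvLoopA array rest acc
    | _, _ => acc

def find_left_peak_part (array : List Int) (peaks : List (List Int)) : Option (List Int) :=
  let start : Int := if peaks ≠ [] then (peaks.map (fun p => (p.length : Int))).sum - 1 else 0
  let left_part := pvLoopA array (PySem.List.pyRange start ((array.length : Int) - 1) 1) []
  if left_part.length ≥ 1 then some left_part else none

-- ===== PORT B =====
-- Source B: flags = [array[i] < array[i+1] for i in range(start, len(array)-1)];
-- k = flags.index(True) (None on ValueError); cnt = flags.index(False, k) - k + 1,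
-- or len(flags) - k when there is no later False; result collected by index arithmetic.
-- Each array[i] here is in range (start ≥ -1, i ≤ len-1), so pyGetD is exact;
-- Python's flags.index(False, k) is index? on flags.drop k, shifted by k (k ≥ 0).
def find_left_peak_part_alt (array : List Int) (peaks : List (List Int)) : Option (List Int) :=
  let start : Int := if peaks ≠ [] then (peaks.map (fun p => (p.length : Int))).sum - 1 else 0
  let flags := (PySem.List.pyRange start ((array.length : Int) - 1) 1).map
      (fun i => decide (PySem.List.pyGetD array i 0 < PySem.List.pyGetD array (i + 1) 0))
  match PySem.List.index? flags true with
  | none => none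
  | some k =>
    let cnt : Nat := match PySem.List.index? (flags.drop k) false with
      | some e => e + 1                        -- ascending run plus the peak element
      | none => flags.length - k               -- ascends to the end: no peak appended
    some ((PySem.List.pyRange 0 (cnt : Int) 1).map
      (fun t => PySem.List.pyGetD array (start + (k : Int) + t) 0))

-- ===== PRECONDITION & SPEC =====
def Spec_find_left_peak_part (array : List Int) (peaks : List (List Int)) (out : Option (List Int)) : Prop := out = find_left_peak_part_alt array peaks
instance (array : List Int) (peaks : List (List Int)) (out : Option (List Int)) : Decidable (Spec_find_left_peak_part array peaks out) := by unfold Spec_find_left_peak_part; infer_instance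

-- ===== CLAIM (what is proved, stated in full; the proofs are below) =====
def Claim_equal_find_left_peak_part : Prop := ∀ (array : List Int) (peaks : List (List Int)), Dom_find_left_peak_part array peaks → Spec_find_left_peak_part array peaks (find_left_peak_part array peaks)

-- ===== LEMMAS AND PROOFS =====

-- proof-side two-phase characterisation of A's loop: skip to the first ascent, then collect
def pvFindStart (array : List Int) (n j : Int) : Int :=
  if h : j < n - 1 then
    match PySem.List.pyGet? array j, PySem.List.pyGet? array (j + 1) with
    | some a, some b => if a < b then j else pvFindStart array n (j + 1)
    | _, _ => j
  else j
termination_by (n - 1 - j).toNat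
decreasing_by omega

def pvCollect (array : List Int) (n j : Int) (acc : List Int) : List Int :=
  if h : j < n - 1 then
    match PySem.List.pyGet? array j, PySem.List.pyGet? array (j + 1) with
    | some a, some b =>
      if a < b then pvCollect array n (j + 1) (acc ++ [a]) else acc ++ [a]
    | _, _ => acc
  else acc
termination_by (n - 1 - j).toNat
decreasing_by omega

-- the flag list of B, starting at index j
def pvFlags (array : List Int) (n j : Int) : List Bool :=
  (PySem.List.pyRange j (n - 1) 1).map
    (fun i => decide (PySem.List.pyGetD array i 0 < PySem.List.pyGetD array (i + 1) 0))

-- in-range lookups: pyGet? returns exactly the pyGetD value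
theorem pvGetSome (xs : List Int) (i : Int) (h : PySem.Raise.InRange xs.length i) :
    PySem.List.pyGet? xs i = some (PySem.List.pyGetD xs i 0) := by
  have hne : PySem.List.pyGet? xs i ≠ none := by
    rw [Ne, PySem.List.pyGet?_eq_none_iff]; exact fun hc => hc h
  obtain ⟨v, hv⟩ := Option.ne_none_iff_exists'.mp hne
  have : PySem.List.pyGetD xs i 0 = (PySem.List.pyGet? xs i).getD 0 := rfl
  rw [this, hv]; rfl

theorem pvFlags_cons {array : List Int} {n j : Int} (h : j < n - 1) :
    pvFlags array n j =
      decide (PySem.List.pyGetD array j 0 < PySem.List.pyGetD array (j + 1) 0)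
        :: pvFlags array n (j + 1) := by
  unfold pvFlags; rw [PySem.List.pyRange_one_cons h]; rfl

theorem pvFlags_nil {array : List Int} {n j : Int} (h : ¬ j < n - 1) :
    pvFlags array n j = [] := by
  unfold pvFlags; rw [PySem.List.pyRange_one_eq_nil (by omega)]; rfl

theorem pvFlags_length (array : List Int) (n j : Int) :
    (pvFlags array n j).length = (n - 1 - j).toNat := by
  unfold pvFlags; rw [List.length_map, PySem.List.length_pyRange_one]

theorem pvFlags_drop (array : List Int) (n : Int) (k : Nat) (j : Int) :
    (pvFlags array n j).drop k = pvFlags array n (j + k) := by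
  induction k generalizing j with
  | zero => simp
  | succ m ih =>
    by_cases h : j < n - 1
    · rw [pvFlags_cons h, List.drop_succ_cons, ih (j + 1)]
      congr 1; push_cast; ring
    · rw [pvFlags_nil h, pvFlags_nil (by push_cast; omega), List.drop_nil]

-- acc is only ever appended to
theorem pvCollect_acc (array : List Int) (n j : Int) (acc : List Int) :
    pvCollect array n j acc = acc ++ pvCollect array n j [] := by
  by_cases h : j < n - 1
  · rcases hga : PySem.List.pyGet? array j with _ | a
    · unfold pvCollect; simp [h, hga]
    · rcases hgb : PySem.List.pyGet? array (j + 1) with _ | b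
      · unfold pvCollect; simp [h, hga, hgb]
      · by_cases hab : a < b
        · conv_lhs => unfold pvCollect
          conv_rhs => unfold pvCollect
          simp only [h, hga, hgb, hab, dif_pos, if_pos]
          rw [pvCollect_acc array n (j + 1) (acc ++ [a]),
              pvCollect_acc array n (j + 1) ([] ++ [a])]
          simp
        · unfold pvCollect; simp [h, hga, hgb, hab]
  · unfold pvCollect; simp [h]
termination_by (n - 1 - j).toNat
decreasing_by all_goals omega

-- search phase of A ↔ first True in the flag list
theorem pvSearch_char (array : List Int) (n j : Int) (hn : n = (array.length : Int))
    (hj : -1 ≤ j)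
    (hnone : PySem.List.index? (pvFlags array n j) true = none) :
    ¬ pvFindStart array n j < n - 1 := by
  by_cases h : j < n - 1
  · have hia : PySem.Raise.InRange array.length j := by
      constructor <;> omega
    have hib : PySem.Raise.InRange array.length (j + 1) := by
      constructor <;> omega
    rw [pvFlags_cons h] at hnone
    by_cases hab : PySem.List.pyGetD array j 0 < PySem.List.pyGetD array (j + 1) 0
    · rw [show decide (PySem.List.pyGetD array j 0 < PySem.List.pyGetD array (j + 1) 0) = true by simp [hab],
          PySem.List.index?_cons_self true (pvFlags array n (j + 1))] at hnone
      exact absurd hnone (by simp)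
    · rw [show decide (PySem.List.pyGetD array j 0 < PySem.List.pyGetD array (j + 1) 0) = false by simp [hab],
          PySem.List.index?_cons_of_ne (pvFlags array n (j + 1)) (by simp : (false : Bool) ≠ true)] at hnone
      have hnone' : PySem.List.index? (pvFlags array n (j + 1)) true = none := by
        rcases hx : PySem.List.index? (pvFlags array n (j + 1)) true with _ | v
        · rfl
        · rw [hx] at hnone; simp at hnone
      have := pvSearch_char array n (j + 1) hn (by omega) hnone'
      have hfs : pvFindStart array n j = pvFindStart array n (j + 1) := by
        conv_lhs => unfold pvFindStart
        simp [h, pvGetSome array j hia, pvGetSome array (j + 1) hib, hab]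
      rw [hfs]
      exact this
  · unfold pvFindStart; simp [h]
termination_by (n - 1 - j).toNat
decreasing_by omega

theorem pvSearch_char_some (array : List Int) (n j : Int) (hn : n = (array.length : Int))
    (hj : -1 ≤ j) (k : Nat)
    (hsome : PySem.List.index? (pvFlags array n j) true = some k) :
    pvFindStart array n j = j + k ∧ j + k < n - 1 := by
  by_cases h : j < n - 1
  · have hia : PySem.Raise.InRange array.length j := by constructor <;> omega
    have hib : PySem.Raise.InRange array.length (j + 1) := by constructor <;> omega
    rw [pvFlags_cons h] at hsome
    by_cases hab : PySem.List.pyGetD array j 0 < PySem.List.pyGetD array (j + 1) 0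
    · rw [show decide (PySem.List.pyGetD array j 0 < PySem.List.pyGetD array (j + 1) 0) = true by simp [hab],
          PySem.List.index?_cons_self true (pvFlags array n (j + 1))] at hsome
      have hk0 : k = 0 := by simpa using (Option.some.inj hsome).symm
      subst hk0
      refine ⟨?_, by push_cast; omega⟩
      have hfs : pvFindStart array n j = j := by
        unfold pvFindStart
        simp [h, pvGetSome array j hia, pvGetSome array (j + 1) hib, hab]
      rw [hfs]; push_cast; ring
    · rw [show decide (PySem.List.pyGetD array j 0 < PySem.List.pyGetD array (j + 1) 0) = false by simp [hab],
          PySem.List.index?_cons_of_ne (pvFlags array n (j + 1)) (by simp : (false : Bool) ≠ true)] at hsome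
      rcases hx : PySem.List.index? (pvFlags array n (j + 1)) true with _ | k'
      · rw [hx] at hsome; simp at hsome
      · rw [hx] at hsome
        simp only [Option.map_some] at hsome
        have hk : k = k' + 1 := (Option.some.inj hsome).symm
        subst hk
        obtain ⟨h1, h2⟩ := pvSearch_char_some array n (j + 1) hn (by omega) k' hx
        constructor
        · have hfs : pvFindStart array n j = pvFindStart array n (j + 1) := by
            conv_lhs => unfold pvFindStart
            simp [h, pvGetSome array j hia, pvGetSome array (j + 1) hib, hab]
          rw [hfs, h1]; push_cast; ring
        · push_cast at h2 ⊢; omega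
  · rw [pvFlags_nil h] at hsome
    exact absurd hsome (by simp [PySem.List.index?_eq_idxOf?])
termination_by (n - 1 - j).toNat
decreasing_by omega

-- shift a range-0 map by one
theorem pvRange_map_shift (c : Nat) (g : Int → Int) :
    (PySem.List.pyRange 0 ((c : Int) + 1) 1).map g
      = g 0 :: (PySem.List.pyRange 0 (c : Int) 1).map (fun t => g (t + 1)) := by
  rw [PySem.List.pyRange_one 0 ((c : Int) + 1), PySem.List.pyRange_one 0 (c : Int)]
  have h1 : ((c : Int) + 1 - 0).toNat = c + 1 := by omega
  have h2 : ((c : Int) - 0).toNat = c := by omega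
  rw [h1, h2, List.range_succ_eq_map, List.map_cons, List.map_cons, List.map_map, List.map_map,
    List.map_map]
  refine List.cons_eq_cons.mpr ⟨by norm_num, ?_⟩
  apply List.map_congr_left
  intro a _
  simp only [Function.comp_apply]
  congr 1

-- collect phase of A ↔ extraction by boundaries in the flag list
theorem pvCollect_char (array : List Int) (n m : Int) (hn : n = (array.length : Int))
    (hm1 : -1 ≤ m) (hm : m < n - 1) :
    pvCollect array n m [] =
      (PySem.List.pyRange 0
          ((match PySem.List.index? (pvFlags array n m) false with
            | some e => e + 1
            | none => (pvFlags array n m).length : Nat) : Int) 1).map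
        (fun t => PySem.List.pyGetD array (m + t) 0) := by
  have hia : PySem.Raise.InRange array.length m := by constructor <;> omega
  have hib : PySem.Raise.InRange array.length (m + 1) := by constructor <;> omega
  rw [pvFlags_cons hm]
  by_cases hab : PySem.List.pyGetD array m 0 < PySem.List.pyGetD array (m + 1) 0
  · rw [show decide (PySem.List.pyGetD array m 0 < PySem.List.pyGetD array (m + 1) 0) = true by simp [hab],
        PySem.List.index?_cons_of_ne (pvFlags array n (m + 1)) (by simp : (true : Bool) ≠ false)]
    have hstep : pvCollect array n m [] = PySem.List.pyGetD array m 0 :: pvCollect array n (m + 1) [] := by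
      conv_lhs => unfold pvCollect
      simp only [hm, dif_pos, pvGetSome array m hia, pvGetSome array (m + 1) hib, hab, if_pos]
      rw [pvCollect_acc array n (m + 1) ([] ++ [PySem.List.pyGetD array m 0])]
      simp
    rw [hstep]
    by_cases hm' : m + 1 < n - 1
    · rw [pvCollect_char array n (m + 1) hn (by omega) hm']
      rcases hx : PySem.List.index? (pvFlags array n (m + 1)) false with _ | e
      · simp only [Option.map_none]
        rw [show (((true :: pvFlags array n (m + 1)).length : Nat) : Int)
            = ((pvFlags array n (m + 1)).length : Int) + 1 by simp,
          pvRange_map_shift]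
        simp only [add_zero]
        congr 1
        apply List.map_congr_left
        intro a _; congr 1; ring
      · simp only [Option.map_some]
        rw [show (((e + 1 + 1 : Nat)) : Int) = ((e + 1 : Nat) : Int) + 1 by push_cast; ring,
          pvRange_map_shift]
        simp only [add_zero]
        congr 1
        apply List.map_congr_left
        intro a _; congr 1; ring
    · -- m+1 is the last index: flags tail is empty, collect at m+1 yields []
      rw [pvFlags_nil hm']
      have hc : pvCollect array n (m + 1) [] = [] := by unfold pvCollect; simp [hm']
      rw [hc]
      rcases hx : PySem.List.index? ([] : List Bool) false with _ | e
      · simp only [Option.map_none]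
        rw [show (((true :: ([] : List Bool)).length : Nat) : Int) = (0 : Int) + 1 by simp,
          PySem.List.pyRange_one_singleton]
        simp
      · exact absurd hx (by simp [PySem.List.index?_eq_idxOf?])
  · rw [show decide (PySem.List.pyGetD array m 0 < PySem.List.pyGetD array (m + 1) 0) = false by simp [hab],
        PySem.List.index?_cons_self false (pvFlags array n (m + 1))]
    have hc : pvCollect array n m [] = [PySem.List.pyGetD array m 0] := by
      unfold pvCollect
      simp [hm, pvGetSome array m hia, pvGetSome array (m + 1) hib, hab]
    rw [hc, show (((0 + 1 : Nat)) : Int) = (0 : Int) + 1 by simp,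
      PySem.List.pyRange_one_singleton]
    simp
termination_by (n - 1 - m).toNat
decreasing_by omega

-- A's loop on an empty accumulator = search phase then collect phase (as in the two-phase view)
theorem pvLoopA_nonempty (array : List Int) (n j : Int) (acc : List Int) (hacc : acc ≠ []) :
    pvLoopA array (PySem.List.pyRange j (n - 1) 1) acc = pvCollect array n j acc := by
  by_cases h : j < n - 1
  · rw [PySem.List.pyRange_one_cons h]
    rcases hga : PySem.List.pyGet? array j with _ | a
    · simp [pvLoopA, pvCollect, hga, h]
    · rcases hgb : PySem.List.pyGet? array (j + 1) with _ | b
      · simp [pvLoopA, pvCollect, hga, hgb, h]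
      · by_cases hab : a < b
        · rw [show pvLoopA array (j :: PySem.List.pyRange (j + 1) (n - 1)) acc
              = pvLoopA array (PySem.List.pyRange (j + 1) (n - 1)) (acc ++ [a]) by
            simp [pvLoopA, hga, hgb, hab]]
          rw [pvLoopA_nonempty array n (j + 1) (acc ++ [a]) (by simp)]
          conv_rhs => unfold pvCollect
          simp [h, hga, hgb, hab]
        · conv_rhs => unfold pvCollect
          simp [pvLoopA, hga, hgb, hab, hacc, h]
  · rw [PySem.List.pyRange_one_eq_nil (by omega)]
    unfold pvCollect
    simp [pvLoopA, h]
termination_by (n - 1 - j).toNat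
decreasing_by omega

theorem pvLoopA_search (array : List Int) (n j : Int) :
    pvLoopA array (PySem.List.pyRange j (n - 1) 1) ([] : List Int) =
      (if pvFindStart array n j < n - 1 then pvCollect array n (pvFindStart array n j) [] else []) := by
  by_cases h : j < n - 1
  · rw [PySem.List.pyRange_one_cons h]
    rcases hga : PySem.List.pyGet? array j with _ | a
    · unfold pvFindStart pvCollect
      simp [pvLoopA, hga, h]
    · rcases hgb : PySem.List.pyGet? array (j + 1) with _ | b
      · unfold pvFindStart pvCollect
        simp [pvLoopA, hga, hgb, h]
      · by_cases hab : a < b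
        · rw [show pvLoopA array (j :: PySem.List.pyRange (j + 1) (n - 1)) ([] : List Int)
              = pvLoopA array (PySem.List.pyRange (j + 1) (n - 1)) ([] ++ [a]) by
            simp [pvLoopA, hga, hgb, hab]]
          rw [pvLoopA_nonempty array n (j + 1) ([] ++ [a]) (by simp)]
          have hfs : pvFindStart array n j = j := by
            unfold pvFindStart; simp [h, hga, hgb, hab]
          rw [hfs]
          have hc : pvCollect array n j ([] : List Int) = pvCollect array n (j + 1) ([] ++ [a]) := by
            conv_lhs => unfold pvCollect
            simp [h, hga, hgb, hab]
          rw [hc]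
          simp [h]
        · rw [show pvLoopA array (j :: PySem.List.pyRange (j + 1) (n - 1)) ([] : List Int)
              = pvLoopA array (PySem.List.pyRange (j + 1) (n - 1)) ([] : List Int) by
            simp [pvLoopA, hga, hgb, hab]]
          rw [pvLoopA_search array n (j + 1)]
          have hfs : pvFindStart array n j = pvFindStart array n (j + 1) := by
            conv_lhs => unfold pvFindStart
            simp [h, hga, hgb, hab]
          rw [hfs]
  · rw [PySem.List.pyRange_one_eq_nil (by omega)]
    have hfs : pvFindStart array n j = j := by unfold pvFindStart; simp [h]
    simp [pvLoopA, hfs, h]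
termination_by (n - 1 - j).toNat
decreasing_by all_goals omega

-- main: the two wrapped results agree for any start ≥ -1 (the computed start is always ≥ -1)
theorem pvMain (array : List Int) (st : Int) (hst : -1 ≤ st) :
    (if (pvLoopA array (PySem.List.pyRange st ((array.length : Int) - 1)) []).length ≥ 1
       then some (pvLoopA array (PySem.List.pyRange st ((array.length : Int) - 1)) []) else none)
    = (match PySem.List.index? (pvFlags array (array.length : Int) st) true with
       | none => none
       | some k =>
         some ((PySem.List.pyRange 0
             ((match PySem.List.index? ((pvFlags array (array.length : Int) st).drop k) false with
               | some e => e + 1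
               | none => (pvFlags array (array.length : Int) st).length - k : Nat) : Int) 1).map
           (fun t => PySem.List.pyGetD array (st + (k : Int) + t) 0))) := by
  set n : Int := (array.length : Int) with hn
  rw [pvLoopA_search array n st]
  rcases hidx : PySem.List.index? (pvFlags array n st) true with _ | k
  · have hge := pvSearch_char array n st hn hst hidx
    simp [hge]
  · obtain ⟨hfs, hlt⟩ := pvSearch_char_some array n st hn hst k hidx
    obtain ⟨hk_lt, -, -⟩ := PySem.List.getElem_of_index?_eq_some hidx
    have hdrop : (pvFlags array n st).drop k = pvFlags array n (st + k) := pvFlags_drop array n k st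
    have hcol := pvCollect_char array n (st + k) hn (by omega) hlt
    have hlen : (pvFlags array n (st + k)).length = (pvFlags array n st).length - k := by
      rw [pvFlags_length, pvFlags_length]; omega
    rw [hfs, if_pos hlt, hcol, hlen, ← hdrop]
    split_ifs with hcond
    · rfl
    · exfalso
      refine hcond ?_
      rw [List.length_map, PySem.List.length_pyRange_one]
      rcases PySem.List.index? ((pvFlags array n st).drop k) false with _ | e
      · show 1 ≤ ((((pvFlags array n st).length - k : Nat) : Int) - 0).toNat
        omega
      · show 1 ≤ (((e + 1 : Nat) : Int) - 0).toNat
        omega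

-- ===== VERDICT (by name: the statement is the Claim_ definition above) =====
theorem find_left_peak_part_spec : Claim_equal_find_left_peak_part := by
  intro array peaks _
  unfold Spec_find_left_peak_part find_left_peak_part find_left_peak_part_alt
  have hst : -1 ≤ (if peaks ≠ [] then (peaks.map (fun p => (p.length : Int))).sum - 1 else 0) := by
    split_ifs
    · have : 0 ≤ (peaks.map (fun p => (p.length : Int))).sum := by
        apply List.sum_nonneg; intro x hx
        simp only [List.mem_map] at hx
        obtain ⟨p, _, rfl⟩ := hx
        positivity
      omega
    · omega
  exact pvMain array _ hst
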